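-- pv_equiv track=rewrite | github.com/miliar/Code_Jam_Webscraper | solutions_python/Problem_121/130.py | solve
-- ===== SOURCE A (Python) =====
-- def solve(E, R, N, activities):
--   d = dict()
--   def solve(energy, i):
--     if (energy, i) not in d:
--       if i == len(activities):
--         ans = 0
--       else:
--         ans = max(activities[i] * j + solve(min(energy - j +  R, E), i + 1) for j in range(energy + 1))
--       d[energy, i] = ans
--     return d[energy, i]
--   return solve(E, 0)
-- ===== SOURCE B (Python) =====
-- def solve(E, R, N, activities):
--     # Bottom-up DP over energy layers, back to front, with a running prefix
--     # maximum that makes each layer O(E) instead of O(E^2):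
--     # best[e] = max_{0<=j<=e} v*j + nxt[min(e-j+R, E)]
--     #         = v*e + max_{0<=k<=e} (nxt[clamp(k+R)] - v*k).
--     nxt = [0] * (E + 1)
--     for v in reversed(activities):
--         cur = []
--         m = None
--         for e in range(E + 1):
--             t = nxt[max(0, min(e + R, E))] - v * e
--             if m is None or t > m:
--                 m = t
--             cur.append(v * e + m)
--         nxt = cur
--     return nxt[E]
-- ===== Notes on version B (the rewrite author's own statement) =====
-- stated objective: faster
-- what changed: Replaced A's memoized top-down recursion over (energy, i) states, each taking an O(E) max over energy splits, with a bottom-up per-activity layer tabulation in which a running prefix maximum (after reindexing j -> e-j) computes each layer in O(E), giving O(N*E) instead of O(N*E^2).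
-- outside the precondition, e.g. on solve(-1, 0, 0, []): A returns 0, B raises IndexError
import Mathlib
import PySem

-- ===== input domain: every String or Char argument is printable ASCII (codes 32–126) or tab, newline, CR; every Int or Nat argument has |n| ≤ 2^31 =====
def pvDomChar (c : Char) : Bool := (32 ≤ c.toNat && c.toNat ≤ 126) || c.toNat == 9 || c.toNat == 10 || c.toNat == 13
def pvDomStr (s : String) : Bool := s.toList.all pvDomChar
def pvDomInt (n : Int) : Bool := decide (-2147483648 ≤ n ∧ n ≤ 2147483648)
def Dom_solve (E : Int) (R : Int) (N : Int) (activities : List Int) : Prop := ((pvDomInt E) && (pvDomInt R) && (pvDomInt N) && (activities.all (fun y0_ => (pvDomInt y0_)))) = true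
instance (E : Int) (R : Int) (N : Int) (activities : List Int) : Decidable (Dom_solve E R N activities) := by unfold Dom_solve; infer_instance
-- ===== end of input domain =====

-- B replaces A's memoized top-down recursion (O(N·E²) states×choices) by a bottom-up
-- layer tabulation with a running prefix maximum, computing each energy layer in O(E).

-- ===== PORT A =====
-- inner loop of the Python `max(... for j in range(energy+1))`: fold over the j-list,
-- threading the memo dict and the running best (Python's max keeps the larger value).
def solveJLoop (f : PySem.Dict (Int × Int) Int → Int → PySem.Dict (Int × Int) Int × Int)
    (v : Int) : List Int → PySem.Dict (Int × Int) Int × Option Int → PySem.Dict (Int × Int) Int × Option Int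
  | [], st => st
  | j :: js, st =>
      let r := f st.1 j
      let cand := v * j + r.2
      solveJLoop f v js (r.1, match st.2 with
        | none => some cand
        | some b => some (if cand > b then cand else b))

-- the inner recursive `solve(energy, i)`: `rem` is the suffix activities[i:], so
-- `i == len(activities)` is `rem = []` and `activities[i]` is the head of `rem`.
def solveGo (E R : Int) (d : PySem.Dict (Int × Int) Int) (energy : Int) (i : Int) :
    List Int → PySem.Dict (Int × Int) Int × Int
  | [] =>
      match PySem.Dict.get? d (energy, i) with
      | some val => (d, val)
      | none =>
          let d' := d.insert (energy, i) 0
          (d', d'.getD (energy, i) 0)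
  | v :: rest =>
      match PySem.Dict.get? d (energy, i) with
      | some val => (d, val)
      | none =>
          let st := solveJLoop (fun d2 j => solveGo E R d2 (min (energy - j + R) E) (i + 1) rest)
                      v (PySem.List.pyRange 0 (energy + 1) 1) (d, none)
          let d' := st.1.insert (energy, i) (st.2.getD 0)
          (d', d'.getD (energy, i) 0)

def solve (E : Int) (R : Int) (N : Int) (activities : List Int) : Int :=
  (solveGo E R PySem.Dict.empty E 0 activities).2

-- ===== PORT B =====
-- one layer: cur[e] = v*e + max_{k≤e} (nxt[max(0, min(k+R, E))] - v*k), running max in m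
def solveLayer (E R : Int) (nxt : List Int) (v : Int) : List Int :=
  ((PySem.List.pyRange 0 (E + 1) 1).foldl
    (fun (st : List Int × Option Int) e =>
      let t := PySem.List.pyGetD nxt (max 0 (min (e + R) E)) 0 - v * e
      let m : Option Int := match st.2 with
        | none => some t
        | some m0 => some (if t > m0 then t else m0)
      (st.1 ++ [v * e + m.getD 0], m))
    ([], none)).1

def solve_alt (E : Int) (R : Int) (N : Int) (activities : List Int) : Int :=
  let nxt0 : List Int := List.replicate (E + 1).toNat 0
  let nxt := activities.reverse.foldl (fun nxt v => solveLayer E R nxt v) nxt0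
  PySem.List.pyGetD nxt E 0

-- ===== PRECONDITION & SPEC =====
-- Pre_ excludes E < 0 (A raises ValueError on an empty max when activities ≠ [], and on
-- activities = [] A returns 0 while B's table indexing raises IndexError), and R < 0 with
-- two or more activities, where A always raises ValueError (max over an empty range once
-- the energy goes negative).
def Pre_solve (E : Int) (R : Int) (N : Int) (activities : List Int) : Prop :=
  0 ≤ E ∧ (0 ≤ R ∨ activities.length ≤ 1)
instance (E : Int) (R : Int) (N : Int) (activities : List Int) : Decidable (Pre_solve E R N activities) := by unfold Pre_solve; infer_instance

def pvWitness_solve : Int × Int × Int × List Int := (3, 2, 2, [4, 1])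

def Spec_solve (E : Int) (R : Int) (N : Int) (activities : List Int) (out : Int) : Prop := out = solve_alt E R N activities
instance (E : Int) (R : Int) (N : Int) (activities : List Int) (out : Int) : Decidable (Spec_solve E R N activities out) := by unfold Spec_solve; infer_instance

-- ===== CLAIM (what is proved, stated in full; the proofs are below) =====
def Claim_equal_solve : Prop := ∀ (E : Int) (R : Int) (N : Int) (activities : List Int), Dom_solve E R N activities → Pre_solve E R N activities → Spec_solve E R N activities (solve E R N activities)

-- ===== LEMMAS AND PROOFS =====

-- option-valued running max step, exactly the combine both ports and fSpec use
def combineOpt (acc : Option Int) (x : Int) : Option Int :=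
  match acc with
  | none => some x
  | some b => some (if x > b then x else b)

def pmax (xs : List Int) : Option Int := xs.foldl combineOpt none

-- pure (memo-free) specification of A's recursion, same fold shape as the ports
def fSpec (E R : Int) : List Int → Int → Int
  | [], _ => 0
  | v :: rest, energy =>
      (((PySem.List.pyRange 0 (energy + 1) 1).foldl
        (fun acc j => combineOpt acc (v * j + fSpec E R rest (min (energy - j + R) E)))
        none).getD 0)

lemma match_eq_combineOpt (a : Option Int) (x : Int) :
    (match a with | none => some x | some b => some (if x > b then x else b)) = combineOpt a x := by
  cases a <;> rfl

@[simp] lemma combineOpt_none (x : Int) : combineOpt none x = some x := rfl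

@[simp] lemma combineOpt_some (b x : Int) : combineOpt (some b) x = some (max b x) := by
  simp only [combineOpt]
  congr 1
  omega

lemma foldl_combineOpt_some (l : List Int) : ∀ b : Int, l.foldl combineOpt (some b) = some (l.foldl max b) := by
  induction l with
  | nil => intro b; rfl
  | cons x t ih => intro b; simp [ih]

lemma pmax_cons (x : Int) (l : List Int) : pmax (x :: l) = some (l.foldl max x) := by
  simp [pmax, foldl_combineOpt_some]

lemma foldl_max_facts (l : List Int) : ∀ b : Int,
    (l.foldl max b = b ∨ l.foldl max b ∈ l) ∧ b ≤ l.foldl max b ∧ ∀ x ∈ l, x ≤ l.foldl max b := by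
  induction l with
  | nil => intro b; simp
  | cons y t ih =>
      intro b
      obtain ⟨hmem, hle, hall⟩ := ih (max b y)
      refine ⟨?_, ?_, ?_⟩
      · rw [List.foldl_cons]
        rcases hmem with h | h
        · rw [h]
          rcases max_choice b y with hb | hy
          · left; exact hb
          · right; rw [hy]; exact List.mem_cons_self
        · right; exact List.mem_cons_of_mem _ h
      · calc b ≤ max b y := le_max_left _ _
          _ ≤ t.foldl max (max b y) := hle
      · intro x hx
        rcases List.mem_cons.mp hx with rfl | hx
        · calc x ≤ max b x := le_max_right _ _
            _ ≤ t.foldl max (max b x) := hle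
        · exact hall x hx

lemma pmax_mem {l : List Int} {m : Int} (h : pmax l = some m) : m ∈ l := by
  cases l with
  | nil => simp [pmax] at h
  | cons x t =>
      rw [pmax_cons] at h
      obtain hm := (foldl_max_facts t x).1
      cases h
      rcases hm with h | h
      · simp [h]
      · exact List.mem_cons_of_mem _ h

lemma pmax_isMax {l : List Int} {m : Int} (h : pmax l = some m) : ∀ x ∈ l, x ≤ m := by
  cases l with
  | nil => simp [pmax] at h
  | cons x t =>
      rw [pmax_cons] at h
      cases h
      intro y hy
      rcases List.mem_cons.mp hy with rfl | hy
      · exact (foldl_max_facts t y).2.1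
      · exact (foldl_max_facts t x).2.2 y hy

lemma pmax_ne_none {l : List Int} (h : l ≠ []) : ∃ m, pmax l = some m := by
  cases l with
  | nil => exact absurd rfl h
  | cons x t => exact ⟨_, pmax_cons x t⟩

lemma pmax_congr {xs ys : List Int} (hxy : ∀ x ∈ xs, ∃ y ∈ ys, x ≤ y)
    (hyx : ∀ y ∈ ys, ∃ x ∈ xs, y ≤ x) (hx : xs ≠ []) (hy : ys ≠ []) : pmax xs = pmax ys := by
  obtain ⟨m1, h1⟩ := pmax_ne_none hx
  obtain ⟨m2, h2⟩ := pmax_ne_none hy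
  rw [h1, h2]
  obtain ⟨y, hym, hle1⟩ := hxy m1 (pmax_mem h1)
  obtain ⟨x, hxm, hle2⟩ := hyx m2 (pmax_mem h2)
  have ha : m1 ≤ m2 := le_trans hle1 (pmax_isMax h2 y hym)
  have hb : m2 ≤ m1 := le_trans hle2 (pmax_isMax h1 x hxm)
  exact congrArg some (le_antisymm ha hb)

lemma foldl_combineOpt_shift (a : Int) (l : List Int) :
    ∀ acc : Option Int, (l.map (fun x => a + x)).foldl combineOpt (acc.map (fun m => a + m))
      = (l.foldl combineOpt acc).map (fun m => a + m) := by
  induction l with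
  | nil => intro acc; rfl
  | cons x t ih =>
      intro acc
      cases acc with
      | none => simpa using ih (some x)
      | some b =>
          have : max (a + b) (a + x) = a + max b x := by omega
          simpa [this] using ih (some (max b x))

lemma pmax_shift (a : Int) (l : List Int) :
    pmax (l.map (fun x => a + x)) = (pmax l).map (fun m => a + m) := by
  simpa [pmax] using foldl_combineOpt_shift a l none

lemma pmax_map_foldl (h : Int → Int) (l : List Int) :
    l.foldl (fun a j => combineOpt a (h j)) none = pmax (l.map h) := by
  rw [pmax, List.foldl_map]

lemma pmax_append_singleton (l : List Int) (x : Int) :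
    pmax (l ++ [x]) = combineOpt (pmax l) x := by
  simp [pmax, List.foldl_append]

-- ===== A-side: the memo dict is correct =====

def InvA (E R : Int) (acts : List Int) (d : PySem.Dict (Int × Int) Int) : Prop :=
  ∀ (e i v : Int), d.get? (e, i) = some v → v = fSpec E R (acts.drop i.toNat) e

lemma jloop_correct (E R : Int) (acts : List Int) (v : Int) (g : Int → Int)
    (f : PySem.Dict (Int × Int) Int → Int → PySem.Dict (Int × Int) Int × Int)
    (hf : ∀ d j, InvA E R acts d → InvA E R acts (f d j).1 ∧ (f d j).2 = g j) :
    ∀ (js : List Int) (d : PySem.Dict (Int × Int) Int) (acc : Option Int), InvA E R acts d →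
      InvA E R acts (solveJLoop f v js (d, acc)).1 ∧
      (solveJLoop f v js (d, acc)).2 = js.foldl (fun a j => combineOpt a (v * j + g j)) acc := by
  intro js
  induction js with
  | nil => intro d acc hInv; exact ⟨hInv, rfl⟩
  | cons j t ih =>
      intro d acc hInv
      obtain ⟨h1, h2⟩ := hf d j hInv
      simp only [solveJLoop, match_eq_combineOpt, h2, List.foldl_cons]
      exact ih (f d j).1 (combineOpt acc (v * j + g j)) h1

lemma go_correct (E R : Int) (acts : List Int) (rem : List Int) :
    ∀ (n : Nat) (d : PySem.Dict (Int × Int) Int) (energy : Int),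
      rem = acts.drop n → InvA E R acts d →
      InvA E R acts (solveGo E R d energy (n : Int) rem).1 ∧
      (solveGo E R d energy (n : Int) rem).2 = fSpec E R rem energy := by
  induction rem with
  | nil =>
      intro n d energy hdrop hInv
      simp only [solveGo]
      cases hget : d.get? (energy, (n : Int)) with
      | some val =>
          refine ⟨hInv, ?_⟩
          have := hInv energy (n : Int) val hget
          simpa [← hdrop, fSpec] using this
      | none =>
          constructor
          · intro e i w hw
            rw [PySem.Dict.get?_insert] at hw
            split at hw
            · rename_i heq
              cases hw
              have : (e, i) = (energy, (n : Int)) := heq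
              cases this
              simp [← hdrop, fSpec]
            · exact hInv e i w hw
          · rw [PySem.Dict.getD_insert_self]
            rfl
  | cons v rest ih =>
      intro n d energy hdrop hInv
      have hrest : rest = acts.drop (n + 1) := by
        rw [← List.tail_drop, ← hdrop]
        rfl
      simp only [solveGo]
      cases hget : d.get? (energy, (n : Int)) with
      | some val =>
          refine ⟨hInv, ?_⟩
          have := hInv energy (n : Int) val hget
          rw [Int.toNat_natCast, ← hdrop] at this
          exact this
      | none =>
          have hf : ∀ d2 j, InvA E R acts d2 →
              InvA E R acts (solveGo E R d2 (min (energy - j + R) E) ((n : Int) + 1) rest).1 ∧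
              (solveGo E R d2 (min (energy - j + R) E) ((n : Int) + 1) rest).2
                = fSpec E R rest (min (energy - j + R) E) := by
            intro d2 j hInv2
            have := ih (n + 1) d2 (min (energy - j + R) E) hrest hInv2
            simpa using this
          obtain ⟨hI, hV⟩ := jloop_correct E R acts v
            (fun j => fSpec E R rest (min (energy - j + R) E))
            (fun d2 j => solveGo E R d2 (min (energy - j + R) E) ((n : Int) + 1) rest)
            hf (PySem.List.pyRange 0 (energy + 1) 1) d none hInv
          have hfs : fSpec E R (v :: rest) energy
              = ((solveJLoop (fun d2 j => solveGo E R d2 (min (energy - j + R) E) ((n : Int) + 1) rest)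
                  v (PySem.List.pyRange 0 (energy + 1) 1) (d, none)).2).getD 0 := by
            rw [hV]; rfl
          constructor
          · intro e i w hw
            rw [PySem.Dict.get?_insert] at hw
            split at hw
            · rename_i heq
              cases hw
              have : (e, i) = (energy, (n : Int)) := heq
              cases this
              rw [Int.toNat_natCast, ← hdrop, hfs]
            · exact hI e i w hw
          · rw [PySem.Dict.getD_insert_self, hfs]

lemma solveA_eq_fSpec (E R N : Int) (acts : List Int) :
    solve E R N acts = fSpec E R acts E := by
  have h0 : InvA E R acts PySem.Dict.empty := by
    intro e i v h
    rw [PySem.Dict.get?_empty] at h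
    cases h
  have := (go_correct E R acts acts 0 PySem.Dict.empty E (by simp) h0).2
  simpa [solve] using this

-- ===== B-side: the layer tabulation computes fSpec =====

def TabB (E R : Int) (rest nxt : List Int) : Prop :=
  nxt.length = (E + 1).toNat ∧
  ∀ e : Int, 0 ≤ e → e ≤ E → PySem.List.pyGetD nxt e 0 = fSpec E R rest e

-- central reindexing step: max over j of v*j + f(e-j) = v*e + max over k of f(k) - v*k
lemma layer_entry (E R v c : Int) (nxt rest : List Int) (hc0 : 0 ≤ c) (hcE : c ≤ E)
    (H : ∀ k : Int, 0 ≤ k → k ≤ E →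
      PySem.List.pyGetD nxt (max 0 (min (k + R) E)) 0 = fSpec E R rest (min (k + R) E)) :
    v * c + (pmax ((PySem.List.pyRange 0 (c + 1) 1).map
        (fun k => PySem.List.pyGetD nxt (max 0 (min (k + R) E)) 0 - v * k))).getD 0
      = fSpec E R (v :: rest) c := by
  have hLne : PySem.List.pyRange 0 (c + 1) 1 ≠ [] := by
    rw [PySem.List.pyRange_one_cons (by omega)]
    exact List.cons_ne_nil _ _
  have hA : fSpec E R (v :: rest) c
      = (pmax ((PySem.List.pyRange 0 (c + 1) 1).map
          (fun j => v * j + fSpec E R rest (min (c - j + R) E)))).getD 0 := by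
    rw [← pmax_map_foldl]
    rfl
  have hpt : ∀ j : Int, 0 ≤ j → j < c + 1 →
      v * j + fSpec E R rest (min (c - j + R) E)
        = v * c + (PySem.List.pyGetD nxt (max 0 (min ((c - j) + R) E)) 0 - v * (c - j)) := by
    intro j hj0 hj1
    rw [← H (c - j) (by omega) (by omega)]
    ring
  have hC : pmax ((PySem.List.pyRange 0 (c + 1) 1).map
        (fun j => v * j + fSpec E R rest (min (c - j + R) E)))
      = pmax ((PySem.List.pyRange 0 (c + 1) 1).map
        (fun k => v * c + (PySem.List.pyGetD nxt (max 0 (min (k + R) E)) 0 - v * k))) := by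
    apply pmax_congr
    · intro x hx
      obtain ⟨j, hj, rfl⟩ := List.mem_map.mp hx
      obtain ⟨hj0, hj1⟩ := (PySem.List.mem_pyRange_one).mp hj
      refine ⟨v * c + (PySem.List.pyGetD nxt (max 0 (min ((c - j) + R) E)) 0 - v * (c - j)), ?_, ?_⟩
      · exact List.mem_map.mpr ⟨c - j, (PySem.List.mem_pyRange_one).mpr ⟨by omega, by omega⟩, rfl⟩
      · exact le_of_eq (hpt j hj0 hj1)
    · intro y hy
      obtain ⟨k, hk, rfl⟩ := List.mem_map.mp hy
      obtain ⟨hk0, hk1⟩ := (PySem.List.mem_pyRange_one).mp hk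
      have hck : c - (c - k) = k := by omega
      refine ⟨v * (c - k) + fSpec E R rest (min (c - (c - k) + R) E),
        List.mem_map.mpr ⟨c - k, (PySem.List.mem_pyRange_one).mpr ⟨by omega, by omega⟩, rfl⟩, ?_⟩
      rw [hck, H k hk0 (by omega)]
      have hvk : v * (c - k) = v * c - v * k := by ring
      omega
    · simpa using hLne
    · simpa using hLne
  have hD : (PySem.List.pyRange 0 (c + 1) 1).map
        (fun k => v * c + (PySem.List.pyGetD nxt (max 0 (min (k + R) E)) 0 - v * k))
      = ((PySem.List.pyRange 0 (c + 1) 1).map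
        (fun k => PySem.List.pyGetD nxt (max 0 (min (k + R) E)) 0 - v * k)).map
        (fun x => v * c + x) := by
    rw [List.map_map]
    rfl
  obtain ⟨m2, hm2⟩ := pmax_ne_none (l := (PySem.List.pyRange 0 (c + 1) 1).map
      (fun k => PySem.List.pyGetD nxt (max 0 (min (k + R) E)) 0 - v * k)) (by simpa using hLne)
  rw [hA, hC, hD, pmax_shift, hm2]
  rfl

lemma pyGetD_append_left (l : List Int) (x e : Int) (he0 : 0 ≤ e) (hlt : e < (l.length : Int)) :
    PySem.List.pyGetD (l ++ [x]) e 0 = PySem.List.pyGetD l e 0 := by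
  rw [PySem.List.pyGetD_eq_getElem _ 0 he0 (by simp; omega),
    PySem.List.pyGetD_eq_getElem _ 0 he0 hlt,
    List.getElem_append_left (by omega)]

lemma pyGetD_append_last (l : List Int) (x e : Int) (he0 : 0 ≤ e) (heq : (l.length : Int) = e) :
    PySem.List.pyGetD (l ++ [x]) e 0 = x := by
  rw [PySem.List.pyGetD_eq_getElem _ 0 he0 (by simp; omega),
    List.getElem_append_right (by omega)]
  have h0 : e.toNat - l.length = 0 := by omega
  simp [h0]

lemma layer_correct (E R v : Int) (nxt rest : List Int) (hE : 0 ≤ E)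
    (H : ∀ k : Int, 0 ≤ k → k ≤ E →
      PySem.List.pyGetD nxt (max 0 (min (k + R) E)) 0 = fSpec E R rest (min (k + R) E)) :
    TabB E R (v :: rest) (solveLayer E R nxt v) := by
  have main : ∀ c : Nat, (c : Int) ≤ E + 1 →
      ((PySem.List.pyRange 0 (c : Int) 1).foldl
        (fun (st : List Int × Option Int) e =>
          let t := PySem.List.pyGetD nxt (max 0 (min (e + R) E)) 0 - v * e
          let m : Option Int := match st.2 with
            | none => some t
            | some m0 => some (if t > m0 then t else m0)
          (st.1 ++ [v * e + m.getD 0], m))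
        ([], none)).1.length = c ∧
      ((PySem.List.pyRange 0 (c : Int) 1).foldl
        (fun (st : List Int × Option Int) e =>
          let t := PySem.List.pyGetD nxt (max 0 (min (e + R) E)) 0 - v * e
          let m : Option Int := match st.2 with
            | none => some t
            | some m0 => some (if t > m0 then t else m0)
          (st.1 ++ [v * e + m.getD 0], m))
        ([], none)).2 = pmax ((PySem.List.pyRange 0 (c : Int) 1).map
          (fun k => PySem.List.pyGetD nxt (max 0 (min (k + R) E)) 0 - v * k)) ∧
      ∀ e : Int, 0 ≤ e → e < (c : Int) →
        PySem.List.pyGetD ((PySem.List.pyRange 0 (c : Int) 1).foldl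
          (fun (st : List Int × Option Int) e =>
            let t := PySem.List.pyGetD nxt (max 0 (min (e + R) E)) 0 - v * e
            let m : Option Int := match st.2 with
              | none => some t
              | some m0 => some (if t > m0 then t else m0)
            (st.1 ++ [v * e + m.getD 0], m))
          ([], none)).1 e 0 = fSpec E R (v :: rest) e := by
    intro c
    induction c with
    | zero =>
        intro _
        rw [show ((0 : Nat) : Int) = 0 by rfl, PySem.List.pyRange_one_eq_nil le_rfl]
        refine ⟨rfl, rfl, ?_⟩
        intro e he0 helt
        omega
    | succ c ih =>
        intro hc1
        have hcast : ((c + 1 : Nat) : Int) = (c : Int) + 1 := by push_cast; ring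
        have hcE : (c : Int) ≤ E := by omega
        have hsplit : PySem.List.pyRange 0 ((c + 1 : Nat) : Int) 1
            = PySem.List.pyRange 0 (c : Int) 1 ++ [(c : Int)] := by
          rw [hcast, PySem.List.pyRange_one_succ_right (by omega)]
        obtain ⟨ihlen, ihm, ihlook⟩ := ih (by omega)
        rw [hsplit, List.foldl_append, List.map_append]
        simp only [List.foldl_cons, List.foldl_nil, List.map_cons, List.map_nil,
          match_eq_combineOpt] at ihlen ihm ihlook ⊢
        rw [ihm, ← pmax_append_singleton]
        have hentry : v * (c : Int) + (pmax ((PySem.List.pyRange 0 ((c : Int) + 1) 1).map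
            (fun k => PySem.List.pyGetD nxt (max 0 (min (k + R) E)) 0 - v * k))).getD 0
            = fSpec E R (v :: rest) (c : Int) :=
          layer_entry E R v (c : Int) nxt rest (by omega) hcE H
        rw [PySem.List.pyRange_one_succ_right (by omega : (0 : Int) ≤ (c : Int)),
          List.map_append, List.map_cons, List.map_nil] at hentry
        refine ⟨by simp [ihlen], rfl, ?_⟩
        intro e he0 helt
        rcases lt_or_eq_of_le (show e ≤ (c : Int) by omega) with hlt | heq
        · rw [pyGetD_append_left _ _ e he0 (by rw [ihlen]; omega)]
          exact ihlook e he0 hlt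
        · subst heq
          rw [pyGetD_append_last _ _ _ he0 (by rw [ihlen])]
          exact hentry
  have hco : (((E + 1).toNat : Nat) : Int) = E + 1 := Int.toNat_of_nonneg (by omega)
  have h := main (E + 1).toNat (by omega)
  rw [hco] at h
  refine ⟨h.1, ?_⟩
  intro e he0 heE
  exact h.2.2 e he0 (by omega)

lemma tab_H (E R : Int) (rest nxt : List Int) (hE : 0 ≤ E) (hR : 0 ≤ R)
    (hTab : TabB E R rest nxt) :
    ∀ k : Int, 0 ≤ k → k ≤ E →
      PySem.List.pyGetD nxt (max 0 (min (k + R) E)) 0 = fSpec E R rest (min (k + R) E) := by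
  intro k hk0 hkE
  have h1 : 0 ≤ min (k + R) E := by omega
  have h2 : min (k + R) E ≤ E := by omega
  rw [max_eq_right h1]
  exact hTab.2 _ h1 h2

lemma replicate_lookup (E : Int) (e : Int) (he0 : 0 ≤ e) (heE : e ≤ E) :
    PySem.List.pyGetD (List.replicate (E + 1).toNat (0 : Int)) e 0 = 0 := by
  have hlt : e < ((List.replicate (E + 1).toNat (0 : Int)).length : Int) := by
    simp [List.length_replicate]; omega
  rw [PySem.List.pyGetD_eq_getElem _ 0 he0 hlt]
  simp

lemma layers (E R : Int) (hE : 0 ≤ E) (hR : 0 ≤ R) (l : List Int) :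
    ∀ (rest nxt : List Int), TabB E R rest nxt →
      TabB E R (l.reverse ++ rest) (l.foldl (fun nxt v => solveLayer E R nxt v) nxt) := by
  induction l with
  | nil => intro rest nxt h; simpa using h
  | cons v t ih =>
      intro rest nxt h
      have h1 : TabB E R (v :: rest) (solveLayer E R nxt v) :=
        layer_correct E R v nxt rest hE (tab_H E R rest nxt hE hR h)
      have := ih (v :: rest) (solveLayer E R nxt v) h1
      simpa [List.append_assoc] using this

lemma solveB_eq_fSpec (E R N : Int) (acts : List Int)
    (hE : 0 ≤ E) (hR : 0 ≤ R ∨ acts.length ≤ 1) :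
    solve_alt E R N acts = fSpec E R acts E := by
  have htab0 : TabB E R [] (List.replicate (E + 1).toNat 0) := by
    refine ⟨by simp, ?_⟩
    intro e he0 heE
    rw [replicate_lookup E e he0 heE]
    rfl
  rcases hR with hR | hlen
  · have := layers E R hE hR acts.reverse [] (List.replicate (E + 1).toNat 0) htab0
    rw [List.reverse_reverse, List.append_nil] at this
    simpa [solve_alt] using this.2 E hE le_rfl
  · match acts with
    | [] =>
        simp only [solve_alt, List.reverse_nil, List.foldl_nil]
        rw [replicate_lookup E E hE le_rfl]
        rfl
    | [v] =>
        have H : ∀ k : Int, 0 ≤ k → k ≤ E →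
            PySem.List.pyGetD (List.replicate (E + 1).toNat (0 : Int)) (max 0 (min (k + R) E)) 0
              = fSpec E R [] (min (k + R) E) := by
          intro k hk0 hkE
          have h1 : (0 : Int) ≤ max 0 (min (k + R) E) := le_max_left _ _
          have h2 : max 0 (min (k + R) E) ≤ E := by omega
          rw [replicate_lookup E _ h1 h2]
          rfl
        have := layer_correct E R v (List.replicate (E + 1).toNat 0) [] hE H
        simpa [solve_alt] using this.2 E hE le_rfl
    | _ :: _ :: _ => simp at hlen

-- ===== VERDICT (by name: the statement is the Claim_ definition above) =====
theorem solve_spec : Claim_equal_solve := by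
  intro E R N acts _ hpre
  unfold Spec_solve
  rw [solveA_eq_fSpec, solveB_eq_fSpec E R N acts hpre.1 hpre.2]
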